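-- pv_equiv track=rewrite | github.com/Auleen/Algos | Codes/Solution_template_stablesort.py | choose_pivot
-- ===== SOURCE A (Python) =====
-- def choose_pivot(arr):
--     possible=[]
--     values={}
--     for i in range(len(arr)):
--     	values.setdefault(arr[i][0],[])
--     	update=values[arr[i][0]]
--     	update.append(i)
--     	values[arr[i][0]]=update
--
--     for i in values.values():
--     	possible.append(i[0])
--
--     return possible
-- ===== SOURCE B (Python) =====
-- def choose_pivot(arr):
--     seen = set()
--     possible = []
--     for i, pair in enumerate(arr):
--         if pair[0] not in seen:
--             seen.add(pair[0])
--             possible.append(i)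
--     return possible
-- ===== Notes on version B (the rewrite author's own statement) =====
-- stated objective: simpler
-- what changed: Replaces A's two passes (group every index into a dict of lists keyed by first tuple component, then extract the head of each list) by a single enumerate scan that keeps a seen-set of keys and appends an index only at a key's first occurrence.
import Mathlib
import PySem

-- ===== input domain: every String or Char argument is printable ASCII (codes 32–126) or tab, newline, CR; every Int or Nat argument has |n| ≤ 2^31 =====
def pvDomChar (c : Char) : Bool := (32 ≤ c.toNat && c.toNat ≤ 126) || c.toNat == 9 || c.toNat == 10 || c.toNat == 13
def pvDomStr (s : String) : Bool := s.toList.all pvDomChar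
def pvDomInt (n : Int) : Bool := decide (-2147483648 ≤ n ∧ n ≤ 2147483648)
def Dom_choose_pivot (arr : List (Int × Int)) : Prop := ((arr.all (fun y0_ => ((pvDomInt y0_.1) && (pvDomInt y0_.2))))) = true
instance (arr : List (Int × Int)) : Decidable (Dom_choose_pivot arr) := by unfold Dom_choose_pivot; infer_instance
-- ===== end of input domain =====

-- B replaces A's two-pass dict-of-index-lists construction by a single enumerate scan
-- with a seen-set, appending an index only at a key's first occurrence (objective: simpler).


-- ===== PORT A =====
-- first loop body: values.setdefault(arr[i][0], []); update = values[arr[i][0]]; update.append(i); values[arr[i][0]] = update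
def chooseStepA (arr : List (Int × Int)) (d : PySem.Dict Int (List Int)) (i : Int) :
    PySem.Dict Int (List Int) :=
  let key := (PySem.List.pyGetD arr i (0, 0)).1
  let d1 := d.setdefault key []
  let update := d1.getD key []
  d1.insert key (update ++ [i])

def choose_pivot (arr : List (Int × Int)) : List Int :=
  let values := (PySem.List.pyRange 0 (arr.length : Int) 1).foldl (chooseStepA arr) PySem.Dict.empty
  -- second loop: for i in values.values(): possible.append(i[0])
  values.values.foldl (fun possible l => possible ++ [PySem.List.pyGetD l 0 0]) []

-- ===== PORT B =====
-- one pass: seen-set of keys; append index at first occurrence of its key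
def chooseStepB (st : PySem.Set Int × List Int) (p : Int × (Int × Int)) :
    PySem.Set Int × List Int :=
  if PySem.Set.contains st.1 p.2.1 then st
  else (PySem.Set.add st.1 p.2.1, st.2 ++ [p.1])

def choose_pivot_alt (arr : List (Int × Int)) : List Int :=
  ((PySem.List.enumerate arr 0).foldl chooseStepB (PySem.Set.empty, [])).2

-- ===== PRECONDITION & SPEC =====
def Spec_choose_pivot (arr : List (Int × Int)) (out : List Int) : Prop := out = choose_pivot_alt arr
instance (arr : List (Int × Int)) (out : List Int) : Decidable (Spec_choose_pivot arr out) := by unfold Spec_choose_pivot; infer_instance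

-- ===== CLAIM (what is proved, stated in full; the proofs are below) =====
def Claim_equal_choose_pivot : Prop := ∀ (arr : List (Int × Int)), Dom_choose_pivot arr → Spec_choose_pivot arr (choose_pivot arr)

-- ===== LEMMAS AND PROOFS =====

def pvHead0 (v : List Int) : Int := PySem.List.pyGetD v 0 0

theorem pvSetContains_eq (s : PySem.Set Int) (x : Int) :
    PySem.Set.contains s x = decide (x ∈ s) := by
  rcases h : PySem.Set.contains s x with _ | _
  · symm; simp only [decide_eq_false_iff_not]
    intro hm
    rw [(PySem.Set.contains_iff s x).2 hm] at h
    cases h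
  · symm; simp [(PySem.Set.contains_iff s x).1 h]

theorem pvHead0_cons (a : Int) (t : List Int) : pvHead0 (a :: t) = a := by
  simp [pvHead0, PySem.List.pyGetD, PySem.List.pyGet?, PySem.List.pyIdx?]

theorem pvHead0_append (v : List Int) (hv : v ≠ []) (x : Int) :
    pvHead0 (v ++ [x]) = pvHead0 v := by
  cases v with
  | nil => exact absurd rfl hv
  | cons a t => rw [List.cons_append, pvHead0_cons, pvHead0_cons]

-- the loop invariant
def pvInv (d : PySem.Dict Int (List Int)) (s : PySem.Set Int) (out : List Int) : Prop :=
  d.keys.Nodup ∧ (∀ v ∈ d.values, v ≠ []) ∧ (∀ k, d.contains k = PySem.Set.contains s k) ∧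
    d.values.map pvHead0 = out

theorem pvInv_step (arr : List (Int × Int)) (d : PySem.Dict Int (List Int))
    (s : PySem.Set Int) (out : List Int) (p : Int × (Int × Int))
    (hp : PySem.List.pyGetD arr p.1 (0, 0) = p.2)
    (h : pvInv d s out) :
    pvInv (chooseStepA arr d p.1) (chooseStepB (s, out) p).1 (chooseStepB (s, out) p).2 := by
  obtain ⟨hnd, hne, hcs, hmap⟩ := h
  by_cases hc : d.contains p.2.1 = true
  · -- key already present: A overwrites in place, B does nothing
    have hsc : PySem.Set.contains s p.2.1 = true := by rw [← hcs]; exact hc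
    have hmem : p.2.1 ∈ s := (PySem.Set.contains_iff s p.2.1).1 hsc
    have hA : chooseStepA arr d p.1 =
        d.insert p.2.1 (d.getD p.2.1 [] ++ [p.1]) := by
      simp only [chooseStepA, hp, PySem.Dict.setdefault_of_contains d [] hc]
    have hB : chooseStepB (s, out) p = (s, out) := by
      simp [chooseStepB, hmem]
    rw [hA, hB]
    refine ⟨?_, ?_, ?_, ?_⟩
    · rw [PySem.Dict.keys_insert_of_contains d _ hc]; exact hnd
    · intro v hv
      rcases PySem.Dict.mem_values_insert _ _ _ _ hv with h1 | h1
      · subst h1; simp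
      · exact hne v h1
    · intro k
      rw [PySem.Dict.contains_insert, hcs]
      by_cases hk : k = p.2.1
      · subst hk; simp [hmem]
      · simp [hk]
    · -- values.map pvHead0 unchanged
      simp only [PySem.Dict.values] at hmap ⊢
      rw [PySem.Dict.items_insert_of_contains d _ hc]
      have hmm : ((d.items.map (fun q => if q.1 == p.2.1 then (p.2.1, d.getD p.2.1 [] ++ [p.1]) else q)).map
          Prod.snd).map pvHead0 = (d.items.map Prod.snd).map pvHead0 := by
        simp only [List.map_map]
        apply List.map_congr_left
        intro q hq
        by_cases hqk : (q.1 == p.2.1) = true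
        · have hq1 : q.1 = p.2.1 := eq_of_beq hqk
          have hqm : (p.2.1, q.2) ∈ d.items := by rw [← hq1]; exact hq
          have hget : d.getD p.2.1 [] = q.2 :=
            PySem.Dict.getD_of_mem_items d hqm hnd []
          have hqne : q.2 ≠ [] := hne q.2 (by
            simp only [PySem.Dict.values]
            exact List.mem_map_of_mem hq)
          simp only [Function.comp, hqk, if_pos]
          rw [hget]
          exact pvHead0_append q.2 hqne p.1
        · simp only [Function.comp, hqk]
          simp
      simpa [PySem.Dict.values] using hmm.trans hmap
  · -- fresh key: A appends (key, [i]), B records the index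
    have hc' : d.contains p.2.1 = false := by simpa using hc
    have hsc : PySem.Set.contains s p.2.1 = false := by rw [← hcs]; exact hc'
    have hmem : p.2.1 ∉ s := by
      intro hm
      rw [(PySem.Set.contains_iff s p.2.1).2 hm] at hsc
      cases hsc
    have hA : chooseStepA arr d p.1 = d.insert p.2.1 [p.1] := by
      simp only [chooseStepA, hp, PySem.Dict.setdefault_of_not_contains d [] hc',
        PySem.Dict.getD_insert_self, PySem.Dict.insert_insert_self, List.nil_append]
    have hB : chooseStepB (s, out) p = (PySem.Set.add s p.2.1, out ++ [p.1]) := by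
      simp [chooseStepB, hmem]
    rw [hA, hB]
    refine ⟨?_, ?_, ?_, ?_⟩
    · rw [PySem.Dict.keys_insert_of_not_contains d _ hc']
      refine List.Nodup.append hnd (List.nodup_singleton _) ?_
      intro a ha hb
      simp only [List.mem_singleton] at hb
      rw [hb] at ha
      have hko := (PySem.Dict.contains_iff_mem_keys d p.2.1).2 ha
      rw [hc'] at hko
      cases hko
    · intro v hv
      rcases PySem.Dict.mem_values_insert _ _ _ _ hv with h1 | h1
      · subst h1; simp
      · exact hne v h1
    · intro k
      rw [PySem.Dict.contains_insert]
      simp only [hcs, pvSetContains_eq, PySem.Set.mem_add]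
      by_cases hk : k = p.2.1 <;> simp [hk]
    · simp only [PySem.Dict.values] at hmap ⊢
      rw [PySem.Dict.items_insert_of_not_contains d _ hc']
      simp [hmap, pvHead0_cons]

theorem pvInv_foldl (arr : List (Int × Int)) :
    ∀ (l : List (Int × (Int × Int))) (d : PySem.Dict Int (List Int))
      (s : PySem.Set Int) (out : List Int),
      (∀ p ∈ l, PySem.List.pyGetD arr p.1 (0, 0) = p.2) →
      pvInv d s out →
      (l.foldl (fun d p => chooseStepA arr d p.1) d).values.map pvHead0 =
        (l.foldl chooseStepB (s, out)).2 := by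
  intro l
  induction l with
  | nil => intro d s out _ h; exact h.2.2.2
  | cons p t ih =>
    intro d s out hall h
    simp only [List.foldl_cons]
    have h' := pvInv_step arr d s out p (hall p (List.mem_cons_self)) h
    have := ih (chooseStepA arr d p.1) (chooseStepB (s, out) p).1 (chooseStepB (s, out) p).2
      (fun q hq => hall q (List.mem_cons_of_mem _ hq)) h'
    simpa using this

theorem pvEnum_get (arr : List (Int × Int)) :
    ∀ p ∈ PySem.List.enumerate arr 0, PySem.List.pyGetD arr p.1 (0, 0) = p.2 := by
  intro p hp
  obtain ⟨k, hk, rfl⟩ := (PySem.List.mem_enumerate_iff arr 0 p).1 hp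
  simp [PySem.List.pyGetD, hk]

-- ===== VERDICT (by name: the statement is the Claim_ definition above) =====
theorem choose_pivot_spec : Claim_equal_choose_pivot := by
  intro arr _
  unfold Spec_choose_pivot choose_pivot choose_pivot_alt
  rw [PySem.List.foldl_append_singleton_eq_map]
  simp only [List.nil_append]
  have hfold :
      (PySem.List.pyRange 0 (arr.length : Int) 1).foldl (chooseStepA arr) PySem.Dict.empty =
        (PySem.List.enumerate arr 0).foldl (fun d p => chooseStepA arr d p.1) PySem.Dict.empty := by
    rw [PySem.List.enumerate_eq_map_pyRange arr (0, 0), List.foldl_map]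
    rfl
  rw [hfold]
  exact pvInv_foldl arr (PySem.List.enumerate arr 0) PySem.Dict.empty PySem.Set.empty []
    (pvEnum_get arr)
    ⟨by simp [PySem.Dict.keys_empty], by simp [PySem.Dict.values, PySem.Dict.empty],
     by intro k; simp [PySem.Dict.contains_empty, PySem.Set.contains, PySem.Set.empty],
     by simp [PySem.Dict.values, PySem.Dict.empty]⟩
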